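-- pv_equiv track=rewrite | github.com/arida0511/Algorithm | Programmers/process.py | solution
-- ===== SOURCE A (Python) =====
-- def solution(priorities, location):
--     answer = 0
--     processes = [0 for _ in range(len(priorities))]     #priorities 큐만큼의 리스트 선언후 0으로 초기화
--     processes[location] = 1     #목표 인덱스에만 값을 1로 설정
--     while(priorities):
--         exe_prior = priorities.pop(0)
--         exe_proce = processes.pop(0)
--         if not priorities:      #더이상 비교할 값이 없으면 break
--             answer += 1
--             break
--         if exe_prior < max(priorities):   #만약 대기중인 프로세스 중 우선순위가 더 높은 것이 있다면
--             priorities.append(exe_prior)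
--             processes.append(exe_proce)
--         else:   #더 높은 것이 없다면
--             answer += 1
--             if exe_proce == 1:      #뽑은 값이 1이라면
--                 break
--     return answer
-- ===== SOURCE B (Python) =====
-- def solution(priorities, location):
--     # Pick the next printed job directly (first job holding the maximum priority,
--     # scanning cyclically), instead of simulating the queue one rotation at a time.
--     loc = location % len(priorities)
--     items = list(enumerate(priorities))
--     count = 0
--     while True:
--         m = max(p for _, p in items)
--         i = next(k for k, (_, p) in enumerate(items) if p == m)
--         count += 1
--         if items[i][0] == loc:
--             return count
--         items = items[i + 1:] + items[:i]
-- ===== Notes on version B (the rewrite author's own statement) =====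
-- stated objective: faster
-- what changed: B drops A's one-element-at-a-time queue rotation and marker list: each round it locates the first maximal-priority job directly (jobs carry their original index via enumerate) and rotates past it in a single slice, so it does one O(n) round per printed job instead of one O(n) max-scan per rotation.
import Mathlib
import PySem

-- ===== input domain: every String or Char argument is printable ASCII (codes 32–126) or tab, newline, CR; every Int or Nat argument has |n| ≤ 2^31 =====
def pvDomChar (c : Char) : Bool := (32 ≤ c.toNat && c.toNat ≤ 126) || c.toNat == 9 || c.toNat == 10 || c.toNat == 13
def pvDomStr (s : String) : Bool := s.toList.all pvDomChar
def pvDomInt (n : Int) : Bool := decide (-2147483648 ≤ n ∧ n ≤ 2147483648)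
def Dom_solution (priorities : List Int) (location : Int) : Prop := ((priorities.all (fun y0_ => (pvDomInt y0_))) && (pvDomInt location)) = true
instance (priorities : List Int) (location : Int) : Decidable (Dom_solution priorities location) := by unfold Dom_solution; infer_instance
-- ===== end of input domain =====

-- B replaces A's one-rotation-at-a-time queue simulation (one pop/append and a max-scan per
-- rotation) by selecting, each round, the first maximal-priority job directly and rotating past
-- it in one slice — fewer rounds, hence faster. A empties its `priorities` argument in place
-- (pop(0) in the loop) while B does not; the equivalence proved here is about the RETURN value only.


-- ===== PORT A =====
-- Python's max(xs) on a nonempty list (both Pythons call the builtin max)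
def pyMaxD (ps : List Int) : Int := (PySem.List.max? ps (fun y => y)).getD 0

-- first index of the maximum; used only as part of A's termination measure and in proofs
def firstMaxIdx (ps : List Int) : Nat := (PySem.List.index? ps (pyMaxD ps)).getD 0

theorem pyMaxD_mem (ps : List Int) (h : ps ≠ []) : pyMaxD ps ∈ ps := by
  unfold pyMaxD
  cases hs : PySem.List.max? ps (fun y => y) with
  | none => exact absurd ((PySem.List.max?_eq_none_iff ps (fun y => y)).mp hs) h
  | some m => simpa using PySem.List.max?_mem hs

theorem pyMaxD_isMax (ps : List Int) (h : ps ≠ []) : ∀ y ∈ ps, y ≤ pyMaxD ps := by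
  intro y hy
  unfold pyMaxD
  cases hs : PySem.List.max? ps (fun y => y) with
  | none => exact absurd ((PySem.List.max?_eq_none_iff ps (fun y => y)).mp hs) h
  | some m => simpa using PySem.List.max?_isMax hs y hy

theorem pyMaxD_eq (ps : List Int) (m : Int) (hm : m ∈ ps) (hmax : ∀ y ∈ ps, y ≤ m) :
    pyMaxD ps = m := by
  have hne : ps ≠ [] := by intro h; subst h; simp at hm
  exact le_antisymm (hmax _ (pyMaxD_mem ps hne)) (pyMaxD_isMax ps hne m hm)

-- the facts about one requeue step, needed by solutionLoop's termination proof
theorem shift_facts (p : Int) (rest : List Int) (hne : rest ≠ []) (hlt : p < pyMaxD rest) :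
    pyMaxD (p :: rest) = pyMaxD rest ∧ pyMaxD (rest ++ [p]) = pyMaxD rest ∧
    ∃ j, PySem.List.index? rest (pyMaxD rest) = some j ∧
      firstMaxIdx (p :: rest) = j + 1 ∧ firstMaxIdx (rest ++ [p]) = j := by
  have hmem : pyMaxD rest ∈ rest := pyMaxD_mem rest hne
  have hmax : ∀ y ∈ rest, y ≤ pyMaxD rest := pyMaxD_isMax rest hne
  have h1 : pyMaxD (p :: rest) = pyMaxD rest := by
    apply pyMaxD_eq
    · exact List.mem_cons_of_mem _ hmem
    · intro y hy
      rcases List.mem_cons.mp hy with h | h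
      · exact h ▸ le_of_lt hlt
      · exact hmax y h
  have h2 : pyMaxD (rest ++ [p]) = pyMaxD rest := by
    apply pyMaxD_eq
    · exact List.mem_append_left _ hmem
    · intro y hy
      rcases List.mem_append.mp hy with h | h
      · exact hmax y h
      · simp at h; exact h ▸ le_of_lt hlt
  obtain ⟨j, hj⟩ := Option.isSome_iff_exists.mp ((PySem.List.index?_isSome_iff rest (pyMaxD rest)).mpr hmem)
  refine ⟨h1, h2, j, hj, ?_, ?_⟩
  · unfold firstMaxIdx
    rw [h1, PySem.List.index?_cons_of_ne _ (ne_of_lt hlt), hj]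
    rfl
  · unfold firstMaxIdx
    rw [h2, PySem.List.index?_append_of_mem _ hmem, hj]
    rfl

theorem firstMaxIdx_shift_lt (p : Int) (rest : List Int) (hne : rest ≠ [])
    (hlt : p < pyMaxD rest) : firstMaxIdx (rest ++ [p]) < firstMaxIdx (p :: rest) := by
  obtain ⟨-, -, j, -, hc, ha⟩ := shift_facts p rest hne hlt
  omega

-- the while loop of A: priorities / processes queues and the answer accumulator
def solutionLoop (ps qs : List Int) (answer : Int) : Int :=
  match ps, qs with
  | [], _ => answer
  | _ :: _, [] => answer      -- unreachable: processes is always as long as priorities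
  | p :: rest, q :: qrest =>
    if h1 : rest = [] then answer + 1
    else if h2 : p < pyMaxD rest then solutionLoop (rest ++ [p]) (qrest ++ [q]) answer
    else if q = 1 then answer + 1
    else solutionLoop rest qrest (answer + 1)
termination_by (ps.length, firstMaxIdx ps)
decreasing_by
  · have hlt := firstMaxIdx_shift_lt p rest h1 h2
    exact Prod.Lex.lt_iff'.mpr ⟨by show (rest ++ [p]).length ≤ (p :: rest).length; simp, fun _ => hlt⟩
  · exact Prod.Lex.lt_iff'.mpr ⟨Nat.le_succ _, fun h => absurd h (Nat.ne_of_lt (Nat.lt_succ_self _))⟩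

def solution (priorities : List Int) (location : Int) : Int :=
  let processes := List.replicate priorities.length (0 : Int)
  let processes := PySem.List.pySetD processes location 1
  solutionLoop priorities processes 0

-- ===== PORT B =====
-- the while loop of B: items = (original index, priority) pairs, count accumulator
def solBLoop (items : List (Int × Int)) (loc : Int) (count : Int) : Int :=
  match items with
  | [] => count               -- unreachable: max() on an empty list would raise in Python
  | it :: itrest =>
    let m := pyMaxD ((it :: itrest).map Prod.snd)
    match hi : PySem.List.index? ((it :: itrest).map Prod.snd) m with
    | none => count           -- unreachable: m is an element of the list
    | some i =>
      if ((it :: itrest).getD i (0, 0)).1 = loc then count + 1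
      else solBLoop ((it :: itrest).drop (i + 1) ++ (it :: itrest).take i) loc (count + 1)
termination_by items.length
decreasing_by
  obtain ⟨hk, -, -⟩ := PySem.List.getElem_of_index?_eq_some hi
  simp at hk ⊢
  omega

def solution_alt (priorities : List Int) (location : Int) : Int :=
  let loc := PySem.Int.mod location (priorities.length : Int)
  solBLoop (PySem.List.enumerate priorities 0) loc 0

-- ===== PRECONDITION & SPEC =====
-- A raises IndexError unless location is a valid (possibly negative) index into priorities
-- (in particular priorities must be nonempty); exactly those inputs are excluded.
def Pre_solution (priorities : List Int) (location : Int) : Prop :=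
  -(priorities.length : Int) ≤ location ∧ location < (priorities.length : Int)
instance (priorities : List Int) (location : Int) : Decidable (Pre_solution priorities location) := by
  unfold Pre_solution; infer_instance

def pvWitness_solution : List Int × Int := ([2, 1, 3, 2], 2)

def Spec_solution (priorities : List Int) (location : Int) (out : Int) : Prop := out = solution_alt priorities location
instance (priorities : List Int) (location : Int) (out : Int) : Decidable (Spec_solution priorities location out) := by unfold Spec_solution; infer_instance

-- ===== CLAIM (what is proved, stated in full; the proofs are below) =====
def Claim_equal_solution : Prop := ∀ (priorities : List Int) (location : Int), Dom_solution priorities location → Pre_solution priorities location → Spec_solution priorities location (solution priorities location)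

-- ===== LEMMAS AND PROOFS =====

theorem loopA_last (p q : Int) (qrest : List Int) (ans : Int) :
    solutionLoop [p] (q :: qrest) ans = ans + 1 := by
  rw [solutionLoop]; simp

theorem loopA_requeue (p q : Int) (rest qrest : List Int) (ans : Int)
    (h1 : rest ≠ []) (h2 : p < pyMaxD rest) :
    solutionLoop (p :: rest) (q :: qrest) ans = solutionLoop (rest ++ [p]) (qrest ++ [q]) ans := by
  rw [solutionLoop]; simp [h1, h2]

theorem loopA_print (p q : Int) (rest qrest : List Int) (ans : Int)
    (h1 : rest ≠ []) (h2 : ¬ p < pyMaxD rest) :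
    solutionLoop (p :: rest) (q :: qrest) ans =
      if q = 1 then ans + 1 else solutionLoop rest qrest (ans + 1) := by
  rw [solutionLoop]; simp [h1, h2]

-- A's loop collapsed over one full round: rotate to the first maximum, then print it
theorem loopA_step (k : Nat) : ∀ (ps qs : List Int) (ans : Int), ps ≠ [] →
    ps.length = qs.length → firstMaxIdx ps = k →
    solutionLoop ps qs ans =
      if ps.length = 1 then ans + 1
      else if qs.getD k 0 = 1 then ans + 1
      else solutionLoop (ps.drop (k + 1) ++ ps.take k) (qs.drop (k + 1) ++ qs.take k) (ans + 1) := by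
  induction k with
  | zero =>
    intro ps qs ans hne hlen hk
    match ps, qs, hne, hlen with
    | p :: rest, q :: qrest, _, hlen =>
    by_cases hr : rest = []
    · subst hr
      rw [loopA_last]
      simp
    · by_cases hlt : p < pyMaxD rest
      · obtain ⟨-, -, j0, -, hc, -⟩ := shift_facts p rest hr hlt
        rw [hc] at hk
        exact absurd hk (by omega)
      · rw [loopA_print p q rest qrest ans hr hlt]
        have hlen1 : ¬ (p :: rest).length = 1 := by
          simp only [List.length_cons]
          have := List.length_pos_iff.mpr hr
          omega
        simp only [if_neg hlen1, List.getD_cons_zero, List.drop_succ_cons, List.drop_zero,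
          List.take_zero, List.append_nil]
  | succ j ih =>
    intro ps qs ans hne hlen hk
    match ps, qs, hne, hlen with
    | p :: rest, q :: qrest, _, hlen =>
    by_cases hr : rest = []
    · subst hr
      have : firstMaxIdx [p] = 0 := by
        unfold firstMaxIdx
        rw [pyMaxD_eq [p] p (by simp) (by simp), PySem.List.index?_cons_self]
        rfl
      omega
    · by_cases hlt : p < pyMaxD rest
      · obtain ⟨-, -, j0, hidx, hc, ha⟩ := shift_facts p rest hr hlt
        have hj : j = j0 := by rw [hc] at hk; omega
        subst hj
        obtain ⟨hjlt, -, -⟩ := PySem.List.getElem_of_index?_eq_some hidx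
        have hql : rest.length = qrest.length := by simpa using hlen
        rw [loopA_requeue p q rest qrest ans hr hlt]
        rw [ih (rest ++ [p]) (qrest ++ [q]) ans (by simp) (by simp; omega) ha]
        have hrl : ¬ (rest ++ [p]).length = 1 := by
          simp only [List.length_append, List.length_singleton]
          have := List.length_pos_iff.mpr hr
          omega
        have hpl : ¬ (p :: rest).length = 1 := by
          simp only [List.length_cons]
          have := List.length_pos_iff.mpr hr
          omega
        rw [if_neg hrl, if_neg hpl]
        have hgd : (qrest ++ [q]).getD j 0 = (q :: qrest).getD (j + 1) 0 := by
          rw [List.getD_cons_succ, List.getD_append _ _ _ _ (by omega)]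
        rw [hgd]
        have e1 : (rest ++ [p]).drop (j + 1) ++ (rest ++ [p]).take j
            = (p :: rest).drop (j + 1 + 1) ++ (p :: rest).take (j + 1) := by
          rw [List.drop_append, List.take_append]
          have h1 : j + 1 - rest.length = 0 := by omega
          have h2 : j - rest.length = 0 := by omega
          simp [h1, h2]
        have e2 : (qrest ++ [q]).drop (j + 1) ++ (qrest ++ [q]).take j
            = (q :: qrest).drop (j + 1 + 1) ++ (q :: qrest).take (j + 1) := by
          rw [List.drop_append, List.take_append]
          have h1 : j + 1 - qrest.length = 0 := by omega
          have h2 : j - qrest.length = 0 := by omega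
          simp [h1, h2]
        rw [e1, e2]
      · -- the head is maximal: firstMaxIdx = 0, contradicting k = j + 1
        have hmax : pyMaxD (p :: rest) = p := by
          apply pyMaxD_eq
          · simp
          · intro y hy
            rcases List.mem_cons.mp hy with h | h
            · omega
            · have := pyMaxD_isMax rest hr y h
              omega
        have : firstMaxIdx (p :: rest) = 0 := by
          unfold firstMaxIdx
          rw [hmax, PySem.List.index?_cons_self]
          rfl
        omega

-- B's loop unfolded once, with the maximum located at index firstMaxIdx
theorem loopB_step (items : List (Int × Int)) (loc count : Int) (hne : items ≠ []) :
    solBLoop items loc count =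
      if (items.getD (firstMaxIdx (items.map Prod.snd)) (0, 0)).1 = loc then count + 1
      else solBLoop (items.drop (firstMaxIdx (items.map Prod.snd) + 1) ++
             items.take (firstMaxIdx (items.map Prod.snd))) loc (count + 1) := by
  match items with
  | it :: itrest =>
    obtain ⟨j, hj⟩ := Option.isSome_iff_exists.mp
      (((PySem.List.index?_isSome_iff ((it :: itrest).map Prod.snd)
          (pyMaxD ((it :: itrest).map Prod.snd)))).mpr (pyMaxD_mem _ (by simp)))
    have hfi : firstMaxIdx ((it :: itrest).map Prod.snd) = j := by
      unfold firstMaxIdx; rw [hj]; rfl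
    rw [solBLoop]
    split
    · next heq =>
      rw [hj] at heq; cases heq
    · next i heq =>
      rw [hj] at heq
      cases heq
      rw [hfi]

theorem firstMaxIdx_lt (ps : List Int) (h : ps ≠ []) : firstMaxIdx ps < ps.length := by
  obtain ⟨j, hj⟩ := Option.isSome_iff_exists.mp
    ((PySem.List.index?_isSome_iff ps (pyMaxD ps)).mpr (pyMaxD_mem ps h))
  obtain ⟨hk, -, -⟩ := PySem.List.getElem_of_index?_eq_some hj
  unfold firstMaxIdx
  rw [hj]
  exact hk

-- the main simulation invariant: A run on (priorities, markers) equals B run on indexed items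
theorem main_loop (n : Nat) : ∀ (items : List (Int × Int)) (loc ans : Int),
    items.length = n → items ≠ [] → (∃ pr ∈ items, pr.1 = loc) →
    solutionLoop (items.map Prod.snd)
      (items.map (fun pr => if pr.1 = loc then (1 : Int) else 0)) ans
      = solBLoop items loc ans := by
  induction n using Nat.strong_induction_on with
  | _ n ih =>
    intro items loc ans hlen hne hinv
    have hpsne : items.map Prod.snd ≠ [] := by simpa using hne
    have hklt : firstMaxIdx (items.map Prod.snd) < items.length := by
      have := firstMaxIdx_lt _ hpsne
      simpa using this
    rw [loopA_step (firstMaxIdx (items.map Prod.snd)) _ _ ans hpsne (by simp) rfl,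
        loopB_step items loc ans hne]
    have hgdq : (items.map (fun pr => if pr.1 = loc then (1 : Int) else 0)).getD
        (firstMaxIdx (items.map Prod.snd)) 0
        = if (items[firstMaxIdx (items.map Prod.snd)]'hklt).1 = loc then (1 : Int) else 0 := by
      rw [List.getD_eq_getElem _ _ (by simpa using hklt), List.getElem_map]
    have hgdi : items.getD (firstMaxIdx (items.map Prod.snd)) (0, 0)
        = items[firstMaxIdx (items.map Prod.snd)]'hklt :=
      List.getD_eq_getElem items (0, 0) hklt
    by_cases hone : items.length = 1
    · -- a single remaining process: it is the target, both loops return ans + 1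
      obtain ⟨pr', rfl⟩ := List.length_eq_one_iff.mp hone
      obtain ⟨pr, hpr, hloc⟩ := hinv
      have hloc' : pr'.1 = loc := by
        have : pr = pr' := by simpa using hpr
        exact this ▸ hloc
      simp only [List.map_cons, List.map_nil] at hklt
      have hk0 : firstMaxIdx [pr'.2] = 0 := by omega
      simp [hk0, hloc']
    · have hlen1 : ¬ (items.map Prod.snd).length = 1 := by simpa using hone
      rw [if_neg hlen1, hgdq, hgdi]
      by_cases hc : (items[firstMaxIdx (items.map Prod.snd)]'hklt).1 = loc
      · simp [hc]
      · rw [if_neg hc, if_neg (by simp), if_neg (by simp [hc])]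
        rw [← List.map_drop, ← List.map_take, ← List.map_append,
            ← List.map_drop, ← List.map_take, ← List.map_append]
        have h0 : items.length ≠ 0 := by
          intro h; exact hne (List.eq_nil_of_length_eq_zero h)
        apply ih (items.length - 1)
        · omega
        · simp
          omega
        · -- the rotated list is nonempty
          intro h
          have hl2 := congrArg List.length h
          simp only [List.length_append, List.length_drop, List.length_take,
            List.length_nil] at hl2
          omega
        · -- the target is still present after removing the printed process
          obtain ⟨pr, hpr, hloc⟩ := hinv
          refine ⟨pr, ?_, hloc⟩
          have hsplit : items = items.take (firstMaxIdx (items.map Prod.snd)) ++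
              items[firstMaxIdx (items.map Prod.snd)]'hklt ::
              items.drop (firstMaxIdx (items.map Prod.snd) + 1) := by
            conv_lhs => rw [← List.take_append_drop (firstMaxIdx (items.map Prod.snd)) items]
            rw [List.drop_eq_getElem_cons hklt]
          rw [hsplit] at hpr
          rcases List.mem_append.mp hpr with h | h
          · exact List.mem_append_right _ h
          · rcases List.mem_cons.mp h with h | h
            · exact absurd (h ▸ hloc) hc
            · exact List.mem_append_left _ h

-- setting a valid negative index: Python's processes[location] = 1 with location < 0
theorem pySetD_neg (l : List Int) (n : Int) (v : Int) (h1 : -(l.length : Int) ≤ n)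
    (h2 : n < 0) : PySem.List.pySetD l n v = l.set (n + l.length).toNat v := by
  have hk : l.length - (-n).toNat = (n + l.length).toNat := by omega
  simp [PySem.List.pySetD, PySem.List.pySet?, PySem.List.pyIdx?, not_le.mpr h2, h1, hk]

-- ===== VERDICT (by name: the statement is the Claim_ definition above) =====
theorem solution_spec : Claim_equal_solution := by
  unfold Claim_equal_solution
  intro ps loc hdom hpre
  obtain ⟨h1, h2⟩ := hpre
  unfold Spec_solution
  show solution ps loc = solution_alt ps loc
  unfold solution solution_alt
  dsimp only
  have hn0 : 0 < ps.length := by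
    rcases Nat.eq_zero_or_pos ps.length with h | h
    · rw [h] at h1 h2; simp at h1 h2; omega
    · exact h
  have hmod : PySem.Int.mod loc (ps.length : Int) = if loc < 0 then loc + ps.length else loc := by
    rw [PySem.Int.mod_eq_emod_of_pos (by exact_mod_cast hn0)]
    by_cases hneg : loc < 0
    · rw [if_pos hneg]
      have h3 : (loc + ps.length) % (ps.length : Int) = loc % (ps.length : Int) := by
        simp
      rw [← h3, Int.emod_eq_of_lt (by omega) (by omega)]
    · rw [if_neg hneg, Int.emod_eq_of_lt (by omega) (by omega)]
  have hlocN0 : 0 ≤ (if loc < 0 then loc + ps.length else loc) := by split <;> omega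
  have hlocNlt : (if loc < 0 then loc + ps.length else loc) < (ps.length : Int) := by
    split <;> omega
  have hjlt : (if loc < 0 then loc + ps.length else loc).toNat < ps.length := by omega
  have hset : PySem.List.pySetD (List.replicate ps.length (0 : Int)) loc 1
      = (List.replicate ps.length (0 : Int)).set
          (if loc < 0 then loc + ps.length else loc).toNat 1 := by
    by_cases hneg : loc < 0
    · rw [pySetD_neg _ _ _ (by simp; omega) hneg]
      simp [hneg]
    · rw [if_neg hneg]
      exact PySem.List.pySetD_of_nonneg _ _ (by omega)
  have hmark : PySem.List.pySetD (List.replicate ps.length (0 : Int)) loc 1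
      = (PySem.List.enumerate ps 0).map
          (fun pr => if pr.1 = (if loc < 0 then loc + ps.length else loc) then (1 : Int) else 0) := by
    rw [hset]
    apply List.ext_getElem
    · simp [PySem.List.length_enumerate]
    · intro k hk1 hk2
      rw [List.getElem_map, PySem.List.getElem_enumerate]
      simp only [List.getElem_set, List.getElem_replicate]
      by_cases hkj : (if loc < 0 then loc + ps.length else loc).toNat = k
      · rw [if_pos hkj, if_pos (by simp at hk1; omega)]
      · rw [if_neg hkj, if_neg (by simp at hk1; intro hc; omega)]
  rw [hmod, hmark]
  have hps : ps = (PySem.List.enumerate ps 0).map Prod.snd := by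
    symm
    simp [PySem.List.map_snd_enumerate ps 0]
  have hne : PySem.List.enumerate ps ≠ [] := by
    intro h
    have h0 := congrArg List.length h
    rw [PySem.List.length_enumerate] at h0
    simp only [List.length_nil] at h0
    omega
  have hexist : ∃ pr ∈ PySem.List.enumerate ps,
      pr.1 = (if loc < 0 then loc + ps.length else loc) := by
    refine ⟨((if loc < 0 then loc + ps.length else loc),
      ps[(if loc < 0 then loc + ps.length else loc).toNat]'hjlt), ?_, rfl⟩
    rw [PySem.List.mem_enumerate_iff]
    exact ⟨(if loc < 0 then loc + ps.length else loc).toNat, hjlt, by simp [Int.toNat_of_nonneg hlocN0]⟩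
  have hml := main_loop ps.length (PySem.List.enumerate ps)
    (if loc < 0 then loc + ps.length else loc) 0
    (by simp [PySem.List.length_enumerate]) hne hexist
  rw [← hps] at hml
  exact hml
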